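-- pv_equiv track=rewrite | github.com/Thernn88/SAPPHYRE | sapphyre/utils.py | find_gap_regions
-- ===== SOURCE A (Python) =====
-- def find_gap_regions(consensus: str, gap="-", min_length=6) -> str:
--     start = None
--     indices = []
--     for i, letter in enumerate(consensus):
--         if letter == gap:
--             if start is None:
--                 start = i
--                 continue
--         else:
--             if start:
--                 if i - start + 1> min_length:
--                     indices.extend(range(start, i))
--                 start = None
--     if start:
--         if len(consensus) - start + 1 > min_length:
--             indices.extend(range(start, len(consensus)))
--     return indices
-- ===== SOURCE B (Python) =====
-- def find_gap_regions(consensus: str, gap="-", min_length=6) -> str: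
--     indices = []
--     n = len(consensus)
--     i = 0
--     while i < n:
--         if consensus[i] == gap:
--             j = i
--             while j < n and consensus[j] == gap:
--                 j += 1
--             if j - i >= min_length:
--                 indices.extend(range(i, j))
--             i = j
--         else:
--             i += 1
--     return indices
-- ===== Notes on version B (the rewrite author's own statement) =====
-- stated objective: alternative
-- what changed: Replaced A's per-character state machine (start=None/index sentinel with a falsy-truth test) by a run-skipping scan: an outer loop that, on meeting a gap character, measures the whole maximal run with an inner loop, emits its indices if long enough, and jumps past it; this also fixes A's falsy-start bug.
-- intended difference: On inputs whose first character equals the gap and which contain some maximal gap run of length >= min_length, A returns [] (its start=0 is falsy, so the state is never reset and every run is dropped), while B returns the indices of all qualifying gap runs, which is evidently what the function is for. — e.g. on find_gap_regions("---A", "-", 3): A returns [], B returns [0, 1, 2]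
import Mathlib
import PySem

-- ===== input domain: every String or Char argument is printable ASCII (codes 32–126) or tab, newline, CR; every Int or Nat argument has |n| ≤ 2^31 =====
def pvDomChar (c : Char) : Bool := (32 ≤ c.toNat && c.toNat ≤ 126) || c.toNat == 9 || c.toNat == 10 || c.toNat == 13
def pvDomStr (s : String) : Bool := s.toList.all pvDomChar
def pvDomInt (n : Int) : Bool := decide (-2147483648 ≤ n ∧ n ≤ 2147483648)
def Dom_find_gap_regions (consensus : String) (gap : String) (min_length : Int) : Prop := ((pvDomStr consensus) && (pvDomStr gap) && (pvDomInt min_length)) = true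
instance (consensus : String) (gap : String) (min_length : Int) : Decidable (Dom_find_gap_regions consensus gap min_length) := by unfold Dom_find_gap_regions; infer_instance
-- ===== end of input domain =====

-- B is a run-skipping scan (no per-character None/0 state variable); it fixes A's falsy-start bug
-- whereby a consensus beginning with the gap character poisons the state and A always returns [].

-- ===== PORT A =====
-- enumerate(consensus) starting at index k
def pyEnum (k : Nat) : List Char → List (Nat × Char)
  | [] => []
  | c :: rest => (k, c) :: pyEnum (k + 1) rest

-- the for-loop of A: state = (start, indices); Python truthiness `if start:` is s ≠ 0
def aLoop (gap : String) (m : Int) : List (Nat × Char) → Option Int → List Int → Option Int × List Int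
  | [], start, indices => (start, indices)
  | (i, letter) :: rest, start, indices =>
    if String.ofList [letter] = gap then
      match start with
      | none => aLoop gap m rest (some (i : Int)) indices
      | some _ => aLoop gap m rest start indices
    else
      match start with
      | none => aLoop gap m rest start indices
      | some s =>
        if s ≠ 0 then
          aLoop gap m rest none
            (if (i : Int) - s + 1 > m then indices ++ PySem.List.pyRange s i 1 else indices)
        else
          aLoop gap m rest start indices

def find_gap_regions (consensus : String) (gap : String) (min_length : Int) : List Int :=
  match aLoop gap min_length (pyEnum 0 consensus.toList) none [] with
  | (start, indices) =>
    match start with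
    | none => indices
    | some s =>
      if s ≠ 0 then
        if ((consensus.toList.length : Int)) - s + 1 > min_length then
          indices ++ PySem.List.pyRange s (consensus.toList.length : Int) 1
        else indices
      else indices

-- ===== PORT B =====
-- inner while of B: length of the leading run of gap characters
def bRun (gap : String) : List Char → Nat
  | [] => 0
  | c :: rest => if String.ofList [c] = gap then bRun gap rest + 1 else 0

-- outer while of B: skip forward run by run
def bGo (gap : String) (m : Int) : List Char → Nat → List Int
  | [], _ => []
  | c :: rest, i =>
    if String.ofList [c] = gap then
      let r := bRun gap rest + 1
      let j := i + r
      (if ((j : Int)) - (i : Int) ≥ m then PySem.List.pyRange (i : Int) (j : Int) 1 else [])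
        ++ bGo gap m (List.drop (bRun gap rest) rest) j
    else
      bGo gap m rest (i + 1)
termination_by l _ => l.length
decreasing_by
  · simp [Nat.lt_succ_of_le (Nat.sub_le _ _)]
  · simp

def find_gap_regions_alt (consensus : String) (gap : String) (min_length : Int) : List Int :=
  bGo gap min_length consensus.toList 0

-- ===== PRECONDITION & SPEC =====
-- On inputs whose first character equals the gap, A sets start=0, which its falsy `if start:`
-- test never resets, so A returns [] there; B returns every maximal gap run of length ≥ min_length
-- (the evidently intended result); D_ holds exactly when the two outputs differ: the first
-- character is the gap AND some maximal gap run reaches min_length.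
def D_find_gap_regions (consensus : String) (gap : String) (min_length : Int) : Prop :=
  consensus.toList ≠ [] ∧ gap.toList = consensus.toList.take 1 ∧
    ∃ t ∈ consensus.toList.tails,
      min_length ≤ ((t.takeWhile (fun ch => String.ofList [ch] == gap)).length : Int)
instance (consensus : String) (gap : String) (min_length : Int) : Decidable (D_find_gap_regions consensus gap min_length) := by unfold D_find_gap_regions; infer_instance

def Spec_find_gap_regions (consensus : String) (gap : String) (min_length : Int) (out : List Int) : Prop := ¬ D_find_gap_regions consensus gap min_length → out = find_gap_regions_alt consensus gap min_length
instance (consensus : String) (gap : String) (min_length : Int) (out : List Int) : Decidable (Spec_find_gap_regions consensus gap min_length out) := by unfold Spec_find_gap_regions; infer_instance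

def pvDiffWitness_find_gap_regions : String × String × Int := ("---A", "-", 3)
def pvDiffWitnessOut_find_gap_regions : (List Int) × (List Int) := ([], [0, 1, 2])

-- ===== CLAIM (what is proved, stated in full; the proofs are below) =====
def Claim_unchanged_find_gap_regions : Prop := ∀ (consensus : String) (gap : String) (min_length : Int), Dom_find_gap_regions consensus gap min_length → Spec_find_gap_regions consensus gap min_length (find_gap_regions consensus gap min_length)
def Claim_exact_find_gap_regions : Prop := ∀ (consensus : String) (gap : String) (min_length : Int), Dom_find_gap_regions consensus gap min_length → D_find_gap_regions consensus gap min_length → find_gap_regions consensus gap min_length ≠ find_gap_regions_alt consensus gap min_length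
def Claim_changed_find_gap_regions : Prop := Dom_find_gap_regions (pvDiffWitness_find_gap_regions.1) (pvDiffWitness_find_gap_regions.2.1) (pvDiffWitness_find_gap_regions.2.2) ∧ D_find_gap_regions (pvDiffWitness_find_gap_regions.1) (pvDiffWitness_find_gap_regions.2.1) (pvDiffWitness_find_gap_regions.2.2) ∧ find_gap_regions (pvDiffWitness_find_gap_regions.1) (pvDiffWitness_find_gap_regions.2.1) (pvDiffWitness_find_gap_regions.2.2) = pvDiffWitnessOut_find_gap_regions.1 ∧ find_gap_regions_alt (pvDiffWitness_find_gap_regions.1) (pvDiffWitness_find_gap_regions.2.1) (pvDiffWitness_find_gap_regions.2.2) = pvDiffWitnessOut_find_gap_regions.2 ∧ pvDiffWitnessOut_find_gap_regions.1 ≠ pvDiffWitnessOut_find_gap_regions.2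

-- ===== LEMMAS AND PROOFS =====

-- the code after A's loop (the trailing-run check), as a function of len(consensus)
def finishN (m : Int) (n : Nat) (st : Option Int × List Int) : List Int :=
  match st.1 with
  | none => st.2
  | some s =>
    if s ≠ 0 then
      if ((n : Int)) - s + 1 > m then st.2 ++ PySem.List.pyRange s (n : Int) 1 else st.2
    else st.2

theorem find_eq_finish (c g : String) (m : Int) :
    find_gap_regions c g m = finishN m c.toList.length (aLoop g m (pyEnum 0 c.toList) none []) := by
  unfold find_gap_regions finishN
  rcases aLoop g m (pyEnum 0 c.toList) none [] with ⟨start, indices⟩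
  cases start <;> simp

-- once start = 0, A's state never changes again
theorem aLoop_poison (g : String) (m : Int) (E : List (Nat × Char)) (acc : List Int) :
    aLoop g m E (some 0) acc = (some 0, acc) := by
  induction E with
  | nil => rfl
  | cons p rest ih =>
    obtain ⟨i, letter⟩ := p
    unfold aLoop
    by_cases h : String.ofList [letter] = g <;> simp [h, ih]

theorem bRun_cons_gap (g : String) (c : Char) (rest : List Char) (hc : String.ofList [c] = g) :
    bRun g (c :: rest) = bRun g rest + 1 := by
  simp [bRun, hc]

theorem bRun_cons_nongap (g : String) (c : Char) (rest : List Char) (hc : ¬ String.ofList [c] = g) :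
    bRun g (c :: rest) = 0 := by
  simp [bRun, hc]

theorem bGo_cons_gap (g : String) (m : Int) (c : Char) (rest : List Char) (i : Nat)
    (hc : String.ofList [c] = g) :
    bGo g m (c :: rest) i =
      (if m ≤ ((i + (bRun g rest + 1) : Nat) : Int) - (i : Int)
        then PySem.List.pyRange (i : Int) ((i + (bRun g rest + 1) : Nat) : Int) 1 else [])
        ++ bGo g m (List.drop (bRun g rest) rest) (i + (bRun g rest + 1)) := by
  conv_lhs => rw [bGo]
  simp only [hc, if_true, ge_iff_le]

theorem bGo_cons_nongap (g : String) (m : Int) (c : Char) (rest : List Char) (i : Nat)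
    (hc : ¬ String.ofList [c] = g) :
    bGo g m (c :: rest) i = bGo g m rest (i + 1) := by
  conv_lhs => rw [bGo]
  simp [hc]

theorem bRun_eq_takeWhile (g : String) (l : List Char) :
    bRun g l = (l.takeWhile (fun ch => String.ofList [ch] == g)).length := by
  induction l with
  | nil => rfl
  | cons c rest ih =>
    by_cases h : String.ofList [c] = g <;> simp [bRun, h, ih]

-- if no suffix starts with a qualifying run, B emits nothing
theorem bGo_nil (g : String) (m : Int) (l : List Char) (i : Nat)
    (h : ∀ t, t <:+ l → ((t.takeWhile (fun ch => String.ofList [ch] == g)).length : Int) < m) :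
    bGo g m l i = [] := by
  induction l, i using bGo.induct g with
  | case1 => simp [bGo]
  | case2 c rest i hc r j ih =>
    have hlen : ((bRun g rest : Int) + 1)
        ≤ (((c :: rest).takeWhile (fun ch => String.ofList [ch] == g)).length : Int) := by
      simp [hc, bRun_eq_takeWhile]
    have hr : ¬ (m ≤ ((i + (bRun g rest + 1) : Nat) : Int) - (i : Int)) := by
      have := h (c :: rest) (List.suffix_refl _)
      push_cast
      push_cast at hlen
      omega
    rw [bGo_cons_gap g m c rest i hc, if_neg hr, List.nil_append]
    exact ih (fun t ht => h t (ht.trans ((List.drop_suffix _ _).trans (List.suffix_cons _ _))))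
  | case3 c rest i hc ih =>
    rw [bGo_cons_nongap g m c rest i hc]
    exact ih (fun t ht => h t (ht.trans (List.suffix_cons _ _)))

-- the joint invariant: A's loop from (start=None) resp. (start=some s, s ≥ 1) at index k
-- agrees with B's run-skipping scan
theorem main_inv (g : String) (m : Int) (l : List Char) :
    (∀ k (acc : List Int), 1 ≤ k →
      finishN m (k + l.length) (aLoop g m (pyEnum k l) none acc) = acc ++ bGo g m l k)
    ∧ (∀ (s : Int) k (acc : List Int), 1 ≤ s →
      finishN m (k + l.length) (aLoop g m (pyEnum k l) (some s) acc)
        = acc ++ (if m ≤ (k : Int) - s + (bRun g l : Int)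
                    then PySem.List.pyRange s ((k : Int) + (bRun g l : Int)) 1 else [])
          ++ bGo g m (List.drop (bRun g l) l) (k + bRun g l)) := by
  induction l with
  | nil =>
    constructor
    · intro k acc hk
      simp [pyEnum, aLoop, finishN, bGo]
    · intro s k acc hs
      have hs' : s ≠ 0 := by omega
      by_cases hcond : m ≤ (k : Int) - s
      · have h2 : ((k : Int)) - s + 1 > m := by omega
        simp [pyEnum, aLoop, finishN, bGo, bRun, hs', h2, hcond]
      · have h2 : ¬ (((k : Int)) - s + 1 > m) := by omega
        simp [pyEnum, aLoop, finishN, bGo, bRun, hs', h2, hcond]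
  | cons c rest ih =>
    obtain ⟨ihN, ihR⟩ := ih
    have hlen : ∀ k : Nat, k + (c :: rest).length = (k + 1) + rest.length := by
      intro k; simp; omega
    constructor
    · intro k acc hk
      by_cases hc : String.ofList [c] = g
      · -- gap at k, start becomes some k
        have step : aLoop g m (pyEnum k (c :: rest)) none acc
            = aLoop g m (pyEnum (k + 1) rest) (some (k : Int)) acc := by
          simp [pyEnum, aLoop, hc]
        rw [hlen, step, ihR (k : Int) (k + 1) acc (by exact_mod_cast hk),
          bGo_cons_gap g m c rest k hc]
        have e1 : ((k + 1 : Nat) : Int) - (k : Int) + (bRun g rest : Int)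
            = ((k + (bRun g rest + 1) : Nat) : Int) - (k : Int) := by push_cast; ring
        have e2 : ((k + 1 : Nat) : Int) + (bRun g rest : Int)
            = ((k + (bRun g rest + 1) : Nat) : Int) := by push_cast; ring
        have e3 : (k + 1) + bRun g rest = k + (bRun g rest + 1) := by omega
        rw [e1, e2, e3, List.append_assoc]
      · -- non-gap at k, start stays none
        have step : aLoop g m (pyEnum k (c :: rest)) none acc
            = aLoop g m (pyEnum (k + 1) rest) none acc := by
          simp [pyEnum, aLoop, hc]
        rw [hlen, step, ihN (k + 1) acc (by omega), bGo_cons_nongap g m c rest k hc]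
    · intro s k acc hs
      have hs' : s ≠ 0 := by omega
      by_cases hc : String.ofList [c] = g
      · -- gap: run continues
        have step : aLoop g m (pyEnum k (c :: rest)) (some s) acc
            = aLoop g m (pyEnum (k + 1) rest) (some s) acc := by
          simp [pyEnum, aLoop, hc]
        rw [hlen, step, ihR s (k + 1) acc hs, bRun_cons_gap g c rest hc, List.drop_succ_cons]
        have e1 : ((k + 1 : Nat) : Int) - s + (bRun g rest : Int)
            = (k : Int) - s + ((bRun g rest + 1 : Nat) : Int) := by push_cast; ring
        have e2 : ((k + 1 : Nat) : Int) + (bRun g rest : Int)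
            = (k : Int) + ((bRun g rest + 1 : Nat) : Int) := by push_cast; ring
        have e3 : (k + 1) + bRun g rest = k + (bRun g rest + 1) := by omega
        rw [e1, e2, e3]
      · -- non-gap: run ends at k
        have step : aLoop g m (pyEnum k (c :: rest)) (some s) acc
            = aLoop g m (pyEnum (k + 1) rest) none
                (if (k : Int) - s + 1 > m then acc ++ PySem.List.pyRange s (k : Int) 1 else acc) := by
          simp [pyEnum, aLoop, hc, hs']
        rw [hlen, step, ihN (k + 1) _ (by omega), bRun_cons_nongap g c rest hc]
        simp only [List.drop_zero, Nat.cast_zero, add_zero]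
        rw [bGo_cons_nongap g m c rest k hc]
        by_cases hcond : m ≤ (k : Int) - s
        · have h2 : ((k : Int)) - s + 1 > m := by omega
          rw [if_pos h2, if_pos hcond, List.append_assoc]
        · have h2 : ¬ (((k : Int)) - s + 1 > m) := by omega
          rw [if_neg h2, if_neg hcond]
          simp

theorem AeqB (c g : String) (m : Int) (hD : ¬ D_find_gap_regions c g m) :
    find_gap_regions c g m = find_gap_regions_alt c g m := by
  rw [find_eq_finish]
  unfold find_gap_regions_alt
  cases hl : c.toList with
  | nil => simp [pyEnum, aLoop, finishN, bGo]
  | cons ch rest =>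
    by_cases hc : String.ofList [ch] = g
    · -- first char is the gap: A is poisoned and returns []; ¬D_ says no run qualifies, so B = []
      have hg : g.toList = (ch :: rest).take 1 := by
        rw [← hc]; simp [String.toList_ofList]
      have hno : ∀ t, t <:+ (ch :: rest) →
          ((t.takeWhile (fun ch' => String.ofList [ch'] == g)).length : Int) < m := by
        intro t ht
        by_contra hge
        exact hD ⟨by rw [hl]; simp, by rw [hl]; exact hg,
          t, by rw [hl]; exact (List.mem_tails t (ch :: rest)).mpr ht, by omega⟩
      have step : aLoop g m (pyEnum 0 (ch :: rest)) none []
          = aLoop g m (pyEnum 1 rest) (some 0) [] := by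
        simp [pyEnum, aLoop, hc]
      rw [step, aLoop_poison, bGo_nil g m (ch :: rest) 0 hno]
      simp [finishN]
    · -- first char is not the gap: plain equivalence via the invariant
      have step : aLoop g m (pyEnum 0 (ch :: rest)) none []
          = aLoop g m (pyEnum 1 rest) none [] := by
        simp [pyEnum, aLoop, hc]
      have hlen : (ch :: rest).length = 1 + rest.length := by simp; omega
      rw [step, hlen, (main_inv g m rest).1 1 [] (by omega), bGo_cons_nongap g m ch rest 0 hc]
      simp

-- length of the leading gap run (proof-side abbreviation of D_'s takeWhile)
def leadLen (g : String) (t : List Char) : Nat :=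
  (t.takeWhile (fun ch => String.ofList [ch] == g)).length

theorem leadLen_cons_pos (g : String) (c : Char) (v : List Char) (hc : String.ofList [c] = g) :
    leadLen g (c :: v) = leadLen g v + 1 := by
  simp [leadLen, hc]

theorem leadLen_cons_neg (g : String) (c : Char) (v : List Char) (hc : ¬ String.ofList [c] = g) :
    leadLen g (c :: v) = 0 := by
  simp [leadLen, hc]

theorem leadLen_eq_bRun (g : String) (t : List Char) : leadLen g t = bRun g t :=
  (bRun_eq_takeWhile g t).symm

theorem head_gap_of_leadLen_pos (g : String) (t : List Char) (h : 1 ≤ leadLen g t) :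
    ∃ d t2, t = d :: t2 ∧ String.ofList [d] = g := by
  cases t with
  | nil => simp [leadLen] at h
  | cons d t2 =>
    by_cases hd : String.ofList [d] = g
    · exact ⟨d, t2, rfl, hd⟩
    · rw [leadLen_cons_neg g d t2 hd] at h; omega

theorem leadLen_drop (g : String) (u : List Char) :
    ∀ a : Nat, a ≤ leadLen g u → leadLen g (u.drop a) = leadLen g u - a := by
  induction u with
  | nil => intro a ha; simp [leadLen] at ha ⊢
  | cons c v ih =>
    intro a ha
    cases a with
    | zero => simp
    | succ a' =>
      have hc : String.ofList [c] = g := by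
        by_contra h
        rw [leadLen_cons_neg g c v h] at ha; omega
      rw [leadLen_cons_pos g c v hc] at ha ⊢
      rw [List.drop_succ_cons, ih a' (by omega)]
      omega

-- inside D_, B finds a qualifying run, so its output is nonempty
theorem bGo_ne_nil (g : String) (m : Int) : ∀ (l : List Char) (i : Nat),
    (∃ t, t <:+ l ∧ m ≤ (leadLen g t : Int)) → (∃ c ∈ l, String.ofList [c] = g) →
    bGo g m l i ≠ [] := by
  intro l i
  induction l, i using bGo.induct g with
  | case1 i =>
    intro _ h2
    simp at h2
  | case2 c rest i hc r j ih =>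
    intro h1 _
    by_cases hm : m ≤ (bRun g rest : Int) + 1
    · rw [bGo_cons_gap g m c rest i hc,
        if_pos (by push_cast; omega : m ≤ ((i + (bRun g rest + 1) : Nat) : Int) - (i : Int))]
      intro hEq
      have hlen := congrArg List.length hEq
      simp only [List.length_append, PySem.List.length_pyRange_one, List.length_nil] at hlen
      omega
    · obtain ⟨t, htl, hlt⟩ := h1
      have hbrest : leadLen g rest = bRun g rest := leadLen_eq_bRun g rest
      have hne : t ≠ c :: rest := by
        intro h; subst h
        rw [leadLen_cons_pos g c rest hc, hbrest] at hlt
        push_cast at hlt; omega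
      have htr : t <:+ rest := (List.suffix_cons_iff.mp htl).resolve_left hne
      have hta : t = rest.drop (rest.length - t.length) := List.suffix_iff_eq_drop.mp htr
      have hab : bRun g rest ≤ rest.length - t.length := by
        by_contra hab
        have h1 : rest.length - t.length ≤ leadLen g rest := by omega
        have := leadLen_drop g rest (rest.length - t.length) h1
        rw [← hta] at this
        rw [this] at hlt
        omega
      have hsuf : t <:+ rest.drop (bRun g rest) := by
        rw [hta, show rest.length - t.length
            = bRun g rest + (rest.length - t.length - bRun g rest) by omega, ← List.drop_drop]
        exact List.drop_suffix _ _
      have hpos : 1 ≤ leadLen g t := by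
        by_contra h
        have : leadLen g t = 0 := by omega
        rw [this] at hlt
        push_cast at hlt; omega
      obtain ⟨d, t2, rfl, hd⟩ := head_gap_of_leadLen_pos g t hpos
      rw [bGo_cons_gap g m c rest i hc,
        if_neg (by push_cast; omega : ¬ m ≤ ((i + (bRun g rest + 1) : Nat) : Int) - (i : Int))]
      simp only [List.nil_append]
      exact ih ⟨d :: t2, hsuf, hlt⟩ ⟨d, hsuf.subset (by simp), hd⟩
  | case3 c rest i hc ih =>
    intro h1 h2
    rw [bGo_cons_nongap g m c rest i hc]
    apply ih
    · obtain ⟨t, htl, hlt⟩ := h1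
      rcases List.suffix_cons_iff.mp htl with rfl | htr
      · rw [leadLen_cons_neg g c rest hc] at hlt
        exact ⟨[], List.nil_suffix, by simpa using hlt⟩
      · exact ⟨t, htr, hlt⟩
    · obtain ⟨d, hd, hdg⟩ := h2
      rcases List.mem_cons.mp hd with rfl | hmem
      · exact absurd hdg hc
      · exact ⟨d, hmem, hdg⟩

-- ===== VERDICT (by name: the statement is the Claim_ definition above) =====
theorem find_gap_regions_spec : Claim_unchanged_find_gap_regions := by
  intro c g m _ hD
  exact AeqB c g m hD

theorem find_gap_regions_changed : Claim_changed_find_gap_regions := by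
  unfold Claim_changed_find_gap_regions
  refine ⟨by decide, by decide, by decide, ?_, by decide⟩
  show find_gap_regions_alt "---A" "-" 3 = [0, 1, 2]
  have hA : ¬ (String.ofList ['A'] = "-") := by decide
  have hG : String.ofList ['-'] = "-" := by decide
  unfold find_gap_regions_alt
  simp only [show ("---A").toList = ['-', '-', '-', 'A'] from rfl]
  rw [bGo.eq_def]
  norm_num [bRun, hG, hA]
  rw [bGo.eq_def]
  norm_num [hA]
  rw [bGo.eq_def]
  norm_num [PySem.List.pyRange, List.range_succ]
  decide

theorem find_gap_regions_tight : Claim_exact_find_gap_regions := by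
  intro c g m _ hD
  obtain ⟨hne, hg, t, htails, hlt⟩ := hD
  cases hl : c.toList with
  | nil => exact absurd hl hne
  | cons ch rest =>
    have hg' : g.toList = [ch] := by rw [hg, hl]; simp
    have hc : String.ofList [ch] = g := by rw [← String.ofList_toList (s := g), hg']
    have hA : find_gap_regions c g m = [] := by
      rw [find_eq_finish]
      have step : aLoop g m (pyEnum 0 c.toList) none [] = aLoop g m (pyEnum 1 rest) (some 0) [] := by
        rw [hl]; simp [pyEnum, aLoop, hc]
      rw [step, aLoop_poison]
      simp [finishN]
    have hB : find_gap_regions_alt c g m ≠ [] := by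
      unfold find_gap_regions_alt
      rw [hl]
      apply bGo_ne_nil g m (ch :: rest) 0
      · refine ⟨t, ?_, hlt⟩
        have := (List.mem_tails t c.toList).mp htails
        rwa [hl] at this
      · exact ⟨ch, by simp, hc⟩
    rw [hA]
    exact fun h => hB h.symm
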